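-- pv_equiv track=rewrite | github.com/hearues-zueke-github/python_programs | modulo_sequences/simple_linear_modulo_sequences.py | get_full_mult_pow_cycle_if_possible
-- ===== SOURCE A (Python) =====
-- def get_full_mult_pow_cycle_if_possible(a, b, m):
-- 	# p = 11
-- 	x = 0
-- 	s = set([0])
-- 	for _ in range(0, m):
-- 		x = (a ^ (x >> 1) + b) % m
-- 		if x in s:
-- 			break
-- 		s.add(x)
--
-- 	is_full_cycle = False
-- 	l_cycle = []
-- 	if len(s) == m:
-- 		is_full_cycle = True
-- 		x = 0
-- 		l_cycle = [0]
-- 		for _ in range(0, m-1):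
-- 			x = (a ^ (x >> 1) + b) % m
-- 			l_cycle.append(x)
--
-- 	return is_full_cycle, l_cycle
-- ===== SOURCE B (Python) =====
-- def get_full_mult_pow_cycle_if_possible(a, b, m):
--     # One pass, one structure: the orbit list itself records what was visited;
--     # no auxiliary set and no second loop re-running the recurrence.
--     l = [0]
--     x = 0
--     for _ in range(m):
--         x = (a ^ (x >> 1) + b) % m
--         if x in l:
--             break
--         l.append(x)
--     return (True, l) if len(l) == m else (False, [])
-- ===== Notes on version B (the rewrite author's own statement) =====
-- stated objective: simpler
-- what changed: B keeps a single orbit list that doubles as the visited structure (membership tested against the list itself) and returns it directly, eliminating A's auxiliary set and A's entire second loop that re-runs the recurrence to rebuild the cycle.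
import Mathlib
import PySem

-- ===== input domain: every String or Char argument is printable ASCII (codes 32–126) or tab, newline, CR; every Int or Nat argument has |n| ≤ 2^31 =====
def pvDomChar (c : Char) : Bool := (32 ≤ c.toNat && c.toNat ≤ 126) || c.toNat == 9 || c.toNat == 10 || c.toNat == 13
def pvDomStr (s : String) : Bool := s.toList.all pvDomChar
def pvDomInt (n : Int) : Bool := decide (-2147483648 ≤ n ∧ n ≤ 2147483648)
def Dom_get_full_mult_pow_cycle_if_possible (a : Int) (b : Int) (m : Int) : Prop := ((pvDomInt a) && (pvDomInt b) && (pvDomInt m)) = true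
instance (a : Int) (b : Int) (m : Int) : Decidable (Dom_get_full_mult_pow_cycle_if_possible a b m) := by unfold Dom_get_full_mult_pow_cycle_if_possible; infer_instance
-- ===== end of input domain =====

-- B keeps only the orbit list (membership tested against the list itself), dropping A's
-- auxiliary set and A's whole second loop that re-runs the recurrence; objective: simpler.

-- one step of the recurrence: x = (a ^ (x >> 1) + b) % m  (Python ^ is xor; + binds tighter)
def pvStep (a b m x : Int) : Int := PySem.Int.mod (PySem.Int.bxor a ((x >>> 1) + b)) m

-- ===== PORT A =====
-- first loop of A: 'for _ in range(0, m)' with break; fuel = number of remaining iterations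
def pvLoopA1 (a b m : Int) : Nat → Int → PySem.Set Int → Int × PySem.Set Int
  | 0, x, s => (x, s)
  | n + 1, x, s =>
      let x' := pvStep a b m x
      if x' ∈ s then (x', s) else pvLoopA1 a b m n x' (PySem.Set.add s x')

-- second loop of A: 'for _ in range(0, m-1)': appends each iterate to l_cycle
def pvLoopA2 (a b m : Int) : Nat → Int → List Int → Int × List Int
  | 0, x, l => (x, l)
  | n + 1, x, l =>
      let x' := pvStep a b m x
      pvLoopA2 a b m n x' (l ++ [x'])

def get_full_mult_pow_cycle_if_possible (a : Int) (b : Int) (m : Int) : Bool × List Int :=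
  let r := pvLoopA1 a b m m.toNat 0 (PySem.Set.ofList [0])
  if (PySem.Set.len r.2 : Int) = m then
    (true, (pvLoopA2 a b m (m - 1).toNat 0 [0]).2)
  else
    (false, [])

-- ===== PORT B =====
-- B's single 'for _ in range(m)' loop: extend the orbit list until a value repeats
def pvOrbit (a b m : Int) : Nat → Int → List Int → List Int
  | 0, _, l => l
  | n + 1, x, l =>
      if pvStep a b m x ∈ l then l
      else pvOrbit a b m n (pvStep a b m x) (l ++ [pvStep a b m x])

def get_full_mult_pow_cycle_if_possible_alt (a : Int) (b : Int) (m : Int) : Bool × List Int :=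
  let l := pvOrbit a b m m.toNat 0 [0]
  if (l.length : Int) = m then (true, l) else (false, [])

-- ===== PRECONDITION & SPEC =====
def Spec_get_full_mult_pow_cycle_if_possible (a : Int) (b : Int) (m : Int) (out : Bool × List Int) : Prop := out = get_full_mult_pow_cycle_if_possible_alt a b m
instance (a : Int) (b : Int) (m : Int) (out : Bool × List Int) : Decidable (Spec_get_full_mult_pow_cycle_if_possible a b m out) := by unfold Spec_get_full_mult_pow_cycle_if_possible; infer_instance

-- ===== CLAIM =====
def Claim_equal_get_full_mult_pow_cycle_if_possible : Prop := ∀ (a : Int) (b : Int) (m : Int), Dom_get_full_mult_pow_cycle_if_possible a b m → Spec_get_full_mult_pow_cycle_if_possible a b m (get_full_mult_pow_cycle_if_possible a b m)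

-- ===== LEMMAS AND PROOFS =====

-- number of successful (non-break) iterations of A's detection loop
def pvSteps (a b m : Int) : Nat → Int → PySem.Set Int → Nat
  | 0, _, _ => 0
  | n + 1, x, s =>
      let x' := pvStep a b m x
      if x' ∈ s then 0 else pvSteps a b m n x' (PySem.Set.add s x') + 1

-- the list of the next n iterates starting from x
def pvGen (a b m : Int) : Nat → Int → List Int
  | 0, _ => []
  | n + 1, x => pvStep a b m x :: pvGen a b m n (pvStep a b m x)

theorem pvGen_length (a b m : Int) : ∀ (n : Nat) (x : Int), (pvGen a b m n x).length = n := by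
  intro n
  induction n with
  | zero => intro x; simp [pvGen]
  | succ k ih => intro x; simp [pvGen, ih]

theorem pvLoopA2_eq (a b m : Int) : ∀ (n : Nat) (x : Int) (l : List Int),
    (pvLoopA2 a b m n x l).2 = l ++ pvGen a b m n x := by
  intro n
  induction n with
  | zero => intro x l; simp [pvLoopA2, pvGen]
  | succ k ih => intro x l; simp [pvLoopA2, pvGen, ih]

theorem pvSteps_le (a b m : Int) : ∀ (n : Nat) (x : Int) (s : PySem.Set Int),
    pvSteps a b m n x s ≤ n := by
  intro n
  induction n with
  | zero => intro x s; simp [pvSteps]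
  | succ k ih =>
    intro x s
    by_cases h : pvStep a b m x ∈ s
    · simp [pvSteps, h]
    · simp only [pvSteps, h, ite_false]
      exact Nat.succ_le_succ (ih _ _)

-- A's final set is the start set followed by the iterates added before the break
theorem pvLoopA1_setEq (a b m : Int) : ∀ (n : Nat) (x : Int) (s : PySem.Set Int),
    (pvLoopA1 a b m n x s).2 = s ++ pvGen a b m (pvSteps a b m n x s) x := by
  intro n
  induction n with
  | zero => intro x s; simp [pvLoopA1, pvSteps, pvGen]
  | succ k ih =>
    intro x s
    by_cases h : pvStep a b m x ∈ s
    · simp [pvLoopA1, pvSteps, pvGen, h]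
    · simp only [pvLoopA1, pvSteps, pvGen, h, ite_false]
      rw [ih, PySem.Set.add_of_not_mem h]
      simp

-- length of A's final set
theorem pvLoopA1_len (a b m : Int) (n : Nat) (x : Int) (s : PySem.Set Int) :
    (pvLoopA1 a b m n x s).2.length = s.length + pvSteps a b m n x s := by
  rw [pvLoopA1_setEq]
  simp [pvGen_length]

-- B's orbit loop is A's detection loop with the set replaced by the list it equals
theorem pvOrbit_eq_loopA1 (a b m : Int) : ∀ (n : Nat) (x : Int) (l : List Int),
    pvOrbit a b m n x l = (pvLoopA1 a b m n x l).2 := by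
  intro n
  induction n with
  | zero => intro x l; simp [pvOrbit, pvLoopA1]
  | succ k ih =>
    intro x l
    by_cases h : pvStep a b m x ∈ l
    · simp [pvOrbit, pvLoopA1, h]
    · simp only [pvOrbit, pvLoopA1, h, ite_false]
      rw [ih, PySem.Set.add_of_not_mem h]

-- ===== VERDICT =====
theorem get_full_mult_pow_cycle_if_possible_spec : Claim_equal_get_full_mult_pow_cycle_if_possible := by
  intro a b m _
  unfold Spec_get_full_mult_pow_cycle_if_possible
  unfold get_full_mult_pow_cycle_if_possible get_full_mult_pow_cycle_if_possible_alt
  have hof : PySem.Set.ofList [(0:Int)] = [0] := by decide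
  rw [hof, pvOrbit_eq_loopA1]
  simp only [PySem.Set.len]
  set k := pvSteps a b m m.toNat 0 [0] with hkd
  have hk_le : k ≤ m.toNat := pvSteps_le a b m m.toNat 0 [0]
  have hlen : (pvLoopA1 a b m m.toNat 0 [0]).2.length = 1 + k := by
    simpa using pvLoopA1_len a b m m.toNat 0 [0]
  by_cases hc : ((pvLoopA1 a b m m.toNat 0 [0]).2.length : Int) = m
  · rw [if_pos hc, if_pos hc]
    -- the condition pins down k = m - 1, so A's rebuilt list is exactly the recorded orbit
    have hm1 : (m - 1).toNat = k := by
      rw [hlen] at hc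
      omega
    rw [pvLoopA2_eq, hm1, pvLoopA1_setEq, ← hkd]
  · rw [if_neg hc, if_neg hc]
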